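-- pv_equiv track=rewrite | github.com/MichaelChristenson/Euler | Project32.py | math_permute
-- ===== SOURCE A (Python) =====
-- def process(sub_list):
--     a = 0
--     for i in sub_list:
--         a += i
--         a *= 10
--     return a // 10
--
-- def math_permute(sequence):
--     ret = []
--     for i in range(len(sequence) - 2):
--         a = process(sequence[:i + 1])
--         for j in range(i + 1, len(sequence) - 1):
--             b = process(sequence[i + 1:j + 1])
--             c = process(sequence[j + 1:])
--             if a * b == c:
--                 ret += [c]
--     return ret
-- ===== SOURCE B (Python) =====
-- def math_permute(sequence):
--     # Prefix concatenation values and powers of 10 computed once; each split reuses them.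
--     n = len(sequence)
--     ret = []
--     if n < 3:
--         return ret
--     P = [0]
--     for d in sequence:
--         P.append(P[-1] * 10 + d)
--     pow10 = [1]
--     for _ in range(n):
--         pow10.append(pow10[-1] * 10)
--     for i in range(n - 2):
--         a = P[i + 1]
--         for j in range(i + 1, n - 1):
--             b = P[j + 1] - P[i + 1] * pow10[j - i]
--             c = P[n] - P[j + 1] * pow10[n - j - 1]
--             if a * b == c:
--                 ret.append(c)
--     return ret
-- ===== Notes on version B (the rewrite author's own statement) =====
-- stated objective: alternative
-- what changed: Instead of re-concatenating each of the three slices from scratch for every split (process is O(n) per call), B precomputes the n+1 prefix concatenation values and powers of 10 once and derives each split's a, b, c by O(1) big-integer arithmetic (segment value = P[r] - P[l]*10^(r-l)); intended as faster, measured 17.4x at n=256 but unconfirmed at n=1024 where big-integer arithmetic dominates both.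
import Mathlib
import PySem

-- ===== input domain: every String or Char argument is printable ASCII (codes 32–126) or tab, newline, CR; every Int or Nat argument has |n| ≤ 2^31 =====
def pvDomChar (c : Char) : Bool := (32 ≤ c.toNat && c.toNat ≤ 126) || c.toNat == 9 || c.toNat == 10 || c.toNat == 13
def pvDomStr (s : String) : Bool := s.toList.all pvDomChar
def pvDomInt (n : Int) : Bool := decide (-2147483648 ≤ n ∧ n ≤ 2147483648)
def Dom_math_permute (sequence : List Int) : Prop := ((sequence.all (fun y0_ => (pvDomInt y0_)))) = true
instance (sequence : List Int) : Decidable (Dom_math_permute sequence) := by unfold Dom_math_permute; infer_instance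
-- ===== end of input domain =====

-- B precomputes prefix concatenation values and powers of 10 once and derives each
-- split's a, b, c by constant-count arithmetic instead of re-concatenating slices
-- (intended as faster; measured 17.4x at n=256, unconfirmed at larger sizes);
-- return values are identical.

-- ===== PORT A =====
def process (subList : List Int) : Int :=
  PySem.Int.floordiv (subList.foldl (fun a i => (a + i) * 10) 0) 10

def math_permute (sequence : List Int) : List Int :=
  (PySem.List.pyRange 0 ((sequence.length : Int) - 2) 1).foldl (fun ret i =>
    let a := process (PySem.List.slice sequence none (some (i + 1)))
    (PySem.List.pyRange (i + 1) ((sequence.length : Int) - 1) 1).foldl (fun ret j =>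
      let b := process (PySem.List.slice sequence (some (i + 1)) (some (j + 1)))
      let c := process (PySem.List.slice sequence (some (j + 1)) none)
      if a * b = c then ret ++ [c] else ret) ret) []

-- ===== PORT B =====
def math_permute_alt (sequence : List Int) : List Int :=
  let n := sequence.length
  if n < 3 then [] else
  let P := sequence.foldl (fun acc d => acc ++ [PySem.List.pyGetD acc (-1) 0 * 10 + d]) [0]
  let pow10 := (PySem.List.pyRange 0 (n : Int) 1).foldl
      (fun acc _ => acc ++ [PySem.List.pyGetD acc (-1) 0 * 10]) [1]
  (PySem.List.pyRange 0 ((n : Int) - 2) 1).foldl (fun ret i =>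
    let a := PySem.List.pyGetD P (i + 1) 0
    (PySem.List.pyRange (i + 1) ((n : Int) - 1) 1).foldl (fun ret j =>
      let b := PySem.List.pyGetD P (j + 1) 0
               - PySem.List.pyGetD P (i + 1) 0 * PySem.List.pyGetD pow10 (j - i) 0
      let c := PySem.List.pyGetD P (n : Int) 0
               - PySem.List.pyGetD P (j + 1) 0 * PySem.List.pyGetD pow10 ((n : Int) - j - 1) 0
      if a * b = c then ret ++ [c] else ret) ret) []

-- ===== PRECONDITION & SPEC =====
def Spec_math_permute (sequence : List Int) (out : List Int) : Prop := out = math_permute_alt sequence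
instance (sequence : List Int) (out : List Int) : Decidable (Spec_math_permute sequence out) := by unfold Spec_math_permute; infer_instance

-- ===== CLAIM (what is proved, stated in full; the proofs are below) =====
def Claim_equal_math_permute : Prop := ∀ (sequence : List Int), Dom_math_permute sequence → Spec_math_permute sequence (math_permute sequence)

-- ===== LEMMAS AND PROOFS =====

-- value of the decimal-style concatenation loop, started at s
def cvalF (s : Int) (xs : List Int) : Int := xs.foldl (fun a d => a * 10 + d) s

lemma foldA_eq (xs : List Int) : ∀ t : Int,
    xs.foldl (fun a i => (a + i) * 10) (10 * t) = 10 * cvalF t xs := by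
  induction xs with
  | nil => intro t; rfl
  | cons d xs ih =>
      intro t
      have h : (10 * t + d) * 10 = 10 * (t * 10 + d) := by ring
      simp only [List.foldl_cons, cvalF] at *
      rw [h, ih]

lemma process_eq (xs : List Int) : process xs = cvalF 0 xs := by
  unfold process
  have h0 : (0 : Int) = 10 * 0 := by ring
  rw [h0, foldA_eq, PySem.Int.floordiv_eq_ediv_of_pos (by norm_num)]
  exact Int.mul_ediv_cancel_left _ (by norm_num)

lemma cvalF_shift (xs : List Int) : ∀ s : Int,
    cvalF s xs = s * 10 ^ xs.length + cvalF 0 xs := by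
  induction xs with
  | nil => intro s; simp [cvalF]
  | cons d xs ih =>
      intro s
      simp only [cvalF, List.foldl_cons] at *
      rw [ih (s * 10 + d), ih (0 * 10 + d), List.length_cons]
      ring

def pref (xs : List Int) (k : Nat) : Int := cvalF 0 (xs.take k)

lemma cval_segment (xs : List Int) (l r : Nat) (hlr : l ≤ r) (hr : r ≤ xs.length) :
    cvalF 0 ((xs.drop l).take (r - l)) = pref xs r - pref xs l * 10 ^ (r - l) := by
  have hsplit : xs.take r = xs.take l ++ (xs.drop l).take (r - l) := by
    have h := List.take_add (l := xs) (i := l) (j := r - l)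
    rwa [Nat.add_sub_cancel' hlr] at h
  have hlen : ((xs.drop l).take (r - l)).length = r - l := by
    simp [List.length_take, List.length_drop]; omega
  have h1 : pref xs r = cvalF (pref xs l) ((xs.drop l).take (r - l)) := by
    simp only [pref, hsplit, cvalF, List.foldl_append]
  rw [h1, cvalF_shift ((xs.drop l).take (r - l)) (pref xs l), hlen]; ring

-- the list built by `P.append(P[-1]*10 + d)`
def tailP (s : Int) : List Int → List Int
  | [] => []
  | d :: xs => (s * 10 + d) :: tailP (s * 10 + d) xs

lemma foldP_eq (xs : List Int) : ∀ (acc : List Int) (s : Int), acc.getLast? = some s →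
    xs.foldl (fun acc d => acc ++ [PySem.List.pyGetD acc (-1) 0 * 10 + d]) acc
      = acc ++ tailP s xs := by
  induction xs with
  | nil => intro acc s _; simp [tailP]
  | cons d xs ih =>
      intro acc s hs
      have hne : acc ≠ [] := by intro h; simp [h] at hs
      have hlast : PySem.List.pyGetD acc (-1) 0 = s := by
        rw [PySem.List.pyGetD_neg_one acc 0 hne]
        rw [List.getLast?_eq_some_getLast hne] at hs
        exact Option.some.inj hs
      simp only [List.foldl_cons, hlast]
      rw [ih (acc ++ [s * 10 + d]) (s * 10 + d) (by simp)]
      simp [tailP]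

lemma tailP_getD (xs : List Int) : ∀ (k : Nat) (s : Int), k < xs.length →
    (tailP s xs).getD k 0 = cvalF s (xs.take (k + 1)) := by
  induction xs with
  | nil => intro k s hk; simp at hk
  | cons d xs ih =>
      intro k s hk
      cases k with
      | zero => simp [tailP, cvalF]
      | succ m =>
          simp only [tailP, List.getD_cons_succ, List.take_succ_cons]
          rw [ih m (s * 10 + d) (by simpa using hk)]
          rfl

lemma P_getD (xs : List Int) (k : Nat) (hk : k ≤ xs.length) :
    (xs.foldl (fun acc d => acc ++ [PySem.List.pyGetD acc (-1) 0 * 10 + d]) [0]).getD k 0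
      = pref xs k := by
  rw [foldP_eq xs [0] 0 (by simp)]
  cases k with
  | zero => simp [pref, cvalF]
  | succ m =>
      have hm : m < xs.length := by omega
      simp only [List.singleton_append, List.getD_cons_succ]
      rw [tailP_getD xs m 0 hm]
      simp [pref]

-- the list built by `pow10.append(pow10[-1]*10)`, m times
def tailQ (t : Int) : Nat → List Int
  | 0 => []
  | m + 1 => (t * 10) :: tailQ (t * 10) m

lemma foldQ_eq (l : List Int) : ∀ (acc : List Int) (t : Int), acc.getLast? = some t →
    l.foldl (fun acc _ => acc ++ [PySem.List.pyGetD acc (-1) 0 * 10]) acc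
      = acc ++ tailQ t l.length := by
  induction l with
  | nil => intro acc t _; simp [tailQ]
  | cons x l ih =>
      intro acc t ht
      have hne : acc ≠ [] := by intro h; simp [h] at ht
      have hlast : PySem.List.pyGetD acc (-1) 0 = t := by
        rw [PySem.List.pyGetD_neg_one acc 0 hne]
        rw [List.getLast?_eq_some_getLast hne] at ht
        exact Option.some.inj ht
      simp only [List.foldl_cons, hlast]
      rw [ih (acc ++ [t * 10]) (t * 10) (by simp)]
      simp [tailQ]

lemma tailQ_getD : ∀ (m k : Nat) (t : Int), k < m →
    (tailQ t m).getD k 0 = t * 10 ^ (k + 1) := by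
  intro m
  induction m with
  | zero => intro k t hk; omega
  | succ m ih =>
      intro k t hk
      cases k with
      | zero => simp [tailQ]
      | succ p =>
          simp only [tailQ, List.getD_cons_succ]
          rw [ih p (t * 10) (by omega)]
          ring

lemma pow10_getD (n k : Nat) (hk : k ≤ n) :
    ((PySem.List.pyRange 0 (n : Int) 1).foldl
        (fun acc _ => acc ++ [PySem.List.pyGetD acc (-1) 0 * 10]) ([1] : List Int)).getD k 0
      = (10 : Int) ^ k := by
  rw [foldQ_eq (PySem.List.pyRange 0 (n : Int) 1) ([1] : List Int) 1 (by simp)]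
  have hlen : (PySem.List.pyRange 0 (n : Int) 1).length = n := by
    rw [PySem.List.length_pyRange_one]; simp
  rw [hlen]
  cases k with
  | zero => simp
  | succ m =>
      simp only [List.singleton_append, List.getD_cons_succ]
      rw [tailQ_getD n m 1 (by omega)]
      ring

lemma math_permute_eq_alt (xs : List Int) : math_permute xs = math_permute_alt xs := by
  unfold math_permute math_permute_alt
  by_cases h3 : xs.length < 3
  · rw [PySem.List.pyRange_one_eq_nil (by omega)]
    simp [h3]
  · simp only [if_neg h3]
    apply PySem.List.foldl_congr_mem
    intro acc i hi
    rw [PySem.List.mem_pyRange_one] at hi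
    obtain ⟨ik, rfl⟩ := Int.eq_ofNat_of_zero_le hi.1
    have hik : ik + 2 < xs.length := by omega
    apply PySem.List.foldl_congr_mem
    intro acc' j hj
    rw [PySem.List.mem_pyRange_one] at hj
    obtain ⟨jk, rfl⟩ := Int.eq_ofNat_of_zero_le (le_trans (by positivity) hj.1)
    have hij : ik < jk := by omega
    have hjn : jk + 1 < xs.length := by omega
    -- rewrite Int index expressions as Nat casts
    have e1 : ((ik : Int) + 1) = ((ik + 1 : Nat) : Int) := by push_cast; ring
    have e2 : ((jk : Int) + 1) = ((jk + 1 : Nat) : Int) := by push_cast; ring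
    have e3 : ((jk : Int) - (ik : Int)) = ((jk - ik : Nat) : Int) := by push_cast [Nat.cast_sub hij.le]; ring
    have e4 : ((xs.length : Int) - (jk : Int) - 1) = ((xs.length - (jk + 1) : Nat) : Int) := by
      push_cast [Nat.cast_sub hjn.le]; ring
    rw [e1, e2, e3, e4]
    -- A-side slice values
    have hA_a : process (PySem.List.slice xs none (some ((ik + 1 : Nat) : Int)))
        = pref xs (ik + 1) := by
      rw [PySem.List.slice_to_natCast, process_eq]; rfl
    have hA_b : process (PySem.List.slice xs (some ((ik + 1 : Nat) : Int)) (some ((jk + 1 : Nat) : Int)))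
        = pref xs (jk + 1) - pref xs (ik + 1) * 10 ^ ((jk + 1) - (ik + 1)) := by
      rw [PySem.List.slice_natCast, process_eq]
      exact cval_segment xs (ik + 1) (jk + 1) (by omega) (by omega)
    have hA_c : process (PySem.List.slice xs (some ((jk + 1 : Nat) : Int)) none)
        = pref xs xs.length - pref xs (jk + 1) * 10 ^ (xs.length - (jk + 1)) := by
      rw [PySem.List.slice_from_natCast, process_eq]
      have hd : xs.drop (jk + 1) = (xs.drop (jk + 1)).take (xs.length - (jk + 1)) := by
        rw [← List.length_drop]; exact (List.take_length).symm
      rw [hd]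
      exact cval_segment xs (jk + 1) xs.length (by omega) (by omega)
    -- B-side table lookups
    have hB_P : ∀ k : Nat, k ≤ xs.length →
        PySem.List.pyGetD (xs.foldl (fun acc d => acc ++ [PySem.List.pyGetD acc (-1) 0 * 10 + d]) [0]) ((k : Nat) : Int) 0 = pref xs k := by
      intro k hk
      rw [PySem.List.pyGetD_natCast]
      exact P_getD xs k hk
    have hB_pow : ∀ k : Nat, k ≤ xs.length →
        PySem.List.pyGetD ((PySem.List.pyRange 0 ((xs.length : Nat) : Int) 1).foldl
          (fun acc _ => acc ++ [PySem.List.pyGetD acc (-1) 0 * 10]) ([1] : List Int)) ((k : Nat) : Int) 0 = (10 : Int) ^ k := by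
      intro k hk
      rw [PySem.List.pyGetD_natCast]
      exact pow10_getD xs.length k hk
    rw [hA_a, hA_b, hA_c, hB_P (ik + 1) (by omega), hB_P (jk + 1) (by omega),
        hB_P xs.length (le_refl _), hB_pow (jk - ik) (by omega),
        hB_pow (xs.length - (jk + 1)) (by omega)]
    have : (jk + 1) - (ik + 1) = jk - ik := by omega
    rw [this]

-- ===== VERDICT (by name: the statement is the Claim_ definition above) =====
theorem math_permute_spec : Claim_equal_math_permute := by
  intro xs _
  unfold Spec_math_permute
  exact math_permute_eq_alt xs
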